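-- pv_equiv track=rewrite | github.com/NathanDunand/Algorithmique-S5 | TD3/III-1.py | is_correct_word
-- ===== SOURCE A (Python) =====
-- def is_correct_word(word1, word2):
--     # On soustrait le premier mot au deuxième se qui permet de récupérer la/les
--     # lettre(s) différentes. Si le nombre de lettres différentes n'est pas égal
--     # à 1 alors c'est que le deuxième mot ne correspond à un mot valide pour le
--     # jeu de la pyramide
--     word1, word2 = word1.lower(), word2.lower()
--     for i in word1:
--         for j in range(len(word2)):
--             if word2[j] == i:
--                 if j == 0:
--                     word2 = word2[j + 1 :]
--                 elif j == len(word2) - 1: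
--                     word2 = word2[:j]
--                 else:
--                     word2 = word2[0:j] + word2[j + 1 :]
--                 break
--     return True if len(word2) == 1 else False
-- ===== SOURCE B (Python) =====
-- def is_correct_word(word1, word2):
--     # Sorted-merge multiset intersection instead of repeated scan-and-remove.
--     s1 = sorted(word1.lower())
--     s2 = sorted(word2.lower())
--     i = j = common = 0
--     while i < len(s1) and j < len(s2):
--         if s1[i] == s2[j]:
--             common += 1
--             i += 1
--             j += 1
--         elif s1[i] < s2[j]:
--             i += 1
--         else:
--             j += 1
--     return len(word2) - common == 1
-- ===== Notes on version B (the rewrite author's own statement) =====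
-- stated objective: faster
-- what changed: Replaces A's per-letter linear scan over word2 with rebuilt string slices by a sort of both lowercased words followed by a single two-pointer merge that counts the multiset intersection.
import Mathlib
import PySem

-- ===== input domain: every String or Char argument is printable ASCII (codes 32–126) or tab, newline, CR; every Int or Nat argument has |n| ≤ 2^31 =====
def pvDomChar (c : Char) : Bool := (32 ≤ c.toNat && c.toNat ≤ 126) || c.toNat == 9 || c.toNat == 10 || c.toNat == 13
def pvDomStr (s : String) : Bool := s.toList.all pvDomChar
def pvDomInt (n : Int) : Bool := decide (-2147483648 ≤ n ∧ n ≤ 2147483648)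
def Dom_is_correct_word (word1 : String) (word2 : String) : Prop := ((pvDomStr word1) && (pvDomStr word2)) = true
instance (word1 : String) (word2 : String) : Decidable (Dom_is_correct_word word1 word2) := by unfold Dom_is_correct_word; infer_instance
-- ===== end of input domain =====

-- B replaces A's repeated scan-and-remove over word2 by sorting both lowercased words and
-- counting the multiset intersection with one two-pointer merge (objective: faster).


-- ===== PORT A =====
-- inner loop 'for j in range(len(word2)): if word2[j] == i: <slice out j>; break'
def pvRemoveGo (c : Char) (w2 : List Char) : List Int → List Char
  | [] => w2
  | j :: js =>
    match PySem.List.pyGet? w2 j with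
    | some ch =>
      if ch = c then
        if j = 0 then PySem.List.slice w2 (some (j + 1)) none
        else if j = PySem.List.len w2 - 1 then PySem.List.slice w2 none (some j)
        else PySem.List.slice w2 (some 0) (some j) ++ PySem.List.slice w2 (some (j + 1)) none
      else pvRemoveGo c w2 js
    | none => w2  -- unreachable: j drawn from range(len(w2))

def pvRemove (w2 : List Char) (c : Char) : List Char :=
  pvRemoveGo c w2 (PySem.List.pyRange 0 (PySem.List.len w2))

def is_correct_word (word1 : String) (word2 : String) : Bool :=
  let w1 := PySem.Chars.lower word1.toList
  let w2 := PySem.Chars.lower word2.toList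
  let w2' := List.foldl pvRemove w2 w1
  if PySem.List.len w2' = 1 then true else false

-- ===== PORT B =====
-- the while-loop of Source B: two pointers i, j over the sorted lists, counting common letters
def pvMergeLoop (s1 s2 : List Char) (i j common : Nat) : Nat :=
  if h : i < s1.length ∧ j < s2.length then
    if s1[i] = s2[j] then pvMergeLoop s1 s2 (i + 1) (j + 1) (common + 1)
    else if s1[i] < s2[j] then pvMergeLoop s1 s2 (i + 1) j common
    else pvMergeLoop s1 s2 i (j + 1) common
  else common
termination_by (s1.length - i) + (s2.length - j)

def is_correct_word_alt (word1 : String) (word2 : String) : Bool :=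
  let s1 := PySem.List.sorted (PySem.Chars.lower word1.toList) (fun c => c) false
  let s2 := PySem.List.sorted (PySem.Chars.lower word2.toList) (fun c => c) false
  let common := pvMergeLoop s1 s2 0 0 0
  decide (PySem.Str.len word2 - (common : Int) = 1)

-- ===== PRECONDITION & SPEC =====
def Spec_is_correct_word (word1 : String) (word2 : String) (out : Bool) : Prop := out = is_correct_word_alt word1 word2
instance (word1 : String) (word2 : String) (out : Bool) : Decidable (Spec_is_correct_word word1 word2 out) := by unfold Spec_is_correct_word; infer_instance

-- ===== CLAIM (what is proved, stated in full; the proofs are below) =====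
def Claim_equal_is_correct_word : Prop := ∀ (word1 : String) (word2 : String), Dom_is_correct_word word1 word2 → Spec_is_correct_word word1 word2 (is_correct_word word1 word2)

-- ===== LEMMAS AND PROOFS =====

-- A's inner loop removes exactly the first occurrence of c (== List.erase)
theorem pvRemoveGo_aux (c : Char) (w2 : List Char) :
    ∀ (m k : Nat), w2.length - k ≤ m →
      pvRemoveGo c w2 (PySem.List.pyRange (k : Int) (w2.length : Int)) =
        w2.take k ++ (w2.drop k).erase c := by
  intro m
  induction m with
  | zero =>
    intro k hk
    have hk' : w2.length ≤ k := by omega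
    rw [PySem.List.pyRange_one_eq_nil (by exact_mod_cast hk')]
    simp [pvRemoveGo, List.take_of_length_le hk', List.drop_eq_nil_of_le hk']
  | succ m ih =>
    intro k hk
    by_cases h : k < w2.length
    · rw [PySem.List.pyRange_one_cons (by exact_mod_cast h)]
      have hget : PySem.List.pyGet? w2 (k : Int) = some w2[k] := by
        simp [List.getElem?_eq_getElem h]
      simp only [pvRemoveGo, hget]
      by_cases hc : w2[k] = c
      · have hr : (w2.drop k).erase c = w2.drop (k + 1) := by
          rw [List.drop_eq_getElem_cons h, hc]
          exact List.erase_cons_head c _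
        rw [if_pos hc, hr]
        split_ifs with h0 hl
        · have hk0 : k = 0 := by exact_mod_cast h0
          subst hk0
          norm_num [PySem.List.slice_from_one]
        · have hkl : k + 1 = w2.length := by
            simp only [PySem.List.len_eq] at hl; omega
          rw [PySem.List.slice_to_natCast]
          simp [List.drop_eq_nil_of_le (le_of_eq hkl.symm)]
        · rw [PySem.List.slice_zero_start, PySem.List.slice_to_natCast]
          have : (k : Int) + 1 = ((k + 1 : Nat) : Int) := by push_cast; ring
          rw [this, PySem.List.slice_from_natCast]
      · rw [if_neg hc]
        have : (k : Int) + 1 = ((k + 1 : Nat) : Int) := by push_cast; ring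
        rw [this, ih (k + 1) (by omega)]
        rw [List.drop_eq_getElem_cons h, List.erase_cons_tail (by simp [hc])]
        rw [show List.take (k + 1) w2 = List.take k w2 ++ [w2[k]] from by
              rw [List.take_add_one]; simp [List.getElem?_eq_getElem h]]
        simp only [List.append_assoc, List.singleton_append]
    · have hk' : w2.length ≤ k := by omega
      rw [PySem.List.pyRange_one_eq_nil (by exact_mod_cast hk')]
      simp [pvRemoveGo, List.take_of_length_le hk', List.drop_eq_nil_of_le hk']

theorem pvRemove_eq_erase (w2 : List Char) (c : Char) : pvRemove w2 c = w2.erase c := by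
  have h := pvRemoveGo_aux c w2 w2.length 0 (by omega)
  simpa [pvRemove, PySem.List.len_eq] using h

-- B's merge over sorted lists counts the multiset intersection: common + |s2 \ s1| = |s2|
theorem pvMergeLoop_spec (s1 s2 : List Char)
    (h1 : s1.Pairwise (· ≤ ·)) (h2 : s2.Pairwise (· ≤ ·)) :
    ∀ (m i j c : Nat), (s1.length - i) + (s2.length - j) ≤ m →
      pvMergeLoop s1 s2 i j c + ((s2.drop j).diff (s1.drop i)).length = c + (s2.drop j).length := by
  intro m
  induction m with
  | zero =>
    intro i j c hm
    have hi : s1.length ≤ i := by omega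
    have hj : s2.length ≤ j := by omega
    rw [pvMergeLoop, dif_neg (by omega)]
    simp [List.drop_eq_nil_of_le hj]
  | succ m ih =>
    intro i j c hm
    by_cases hcond : i < s1.length ∧ j < s2.length
    · obtain ⟨hi, hj⟩ := hcond
      have d1 : s1.drop i = s1[i] :: s1.drop (i + 1) := List.drop_eq_getElem_cons hi
      have d2 : s2.drop j = s2[j] :: s2.drop (j + 1) := List.drop_eq_getElem_cons hj
      have hp1 : (s1.drop i).Pairwise (· ≤ ·) := h1.sublist (List.drop_sublist i s1)
      have hp2 : (s2.drop j).Pairwise (· ≤ ·) := h2.sublist (List.drop_sublist j s2)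
      rw [d1] at hp1; rw [d2] at hp2
      rw [List.pairwise_cons] at hp1 hp2
      rw [pvMergeLoop, dif_pos ⟨hi, hj⟩]
      by_cases heq : s1[i] = s2[j]
      · rw [if_pos heq]
        have hd : (s2.drop j).diff (s1.drop i) = (s2.drop (j + 1)).diff (s1.drop (i + 1)) := by
          rw [d1, d2, List.diff_cons, heq, List.erase_cons_head]
        rw [hd]
        have := ih (i + 1) (j + 1) (c + 1) (by omega)
        have hl2 : (s2.drop j).length = (s2.drop (j + 1)).length + 1 := by
          simp [List.length_drop]; omega
        omega
      · rw [if_neg heq]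
        by_cases hlt : s1[i] < s2[j]
        · rw [if_pos hlt]
          have hnot : s1[i] ∉ s2.drop j := by
            rw [d2]
            intro hmem
            rcases List.mem_cons.mp hmem with h' | h'
            · exact absurd h' (ne_of_lt hlt)
            · exact absurd (hp2.1 _ h') (not_le.mpr hlt)
          have hd : (s2.drop j).diff (s1.drop i) = (s2.drop j).diff (s1.drop (i + 1)) := by
            rw [d1, List.diff_cons, List.erase_of_not_mem hnot]
          rw [hd]
          exact ih (i + 1) j c (by omega)
        · rw [if_neg hlt]
          have hgt : s2[j] < s1[i] := lt_of_le_of_ne (not_lt.mp hlt) (Ne.symm heq)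
          have hnot : s2[j] ∉ s1.drop i := by
            rw [d1]
            intro hmem
            rcases List.mem_cons.mp hmem with h' | h'
            · exact absurd h'.symm heq
            · exact absurd (hp1.1 _ h') (not_le.mpr hgt)
          have hd : (s2.drop j).diff (s1.drop i) = s2[j] :: (s2.drop (j + 1)).diff (s1.drop i) := by
            rw [d2, List.cons_diff, if_neg hnot]
          rw [hd]
          have := ih i (j + 1) c (by omega)
          have hl2 : (s2.drop j).length = (s2.drop (j + 1)).length + 1 := by
            simp [List.length_drop]; omega
          simp only [List.length_cons]
          omega
    · rw [pvMergeLoop, dif_neg hcond]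
      rcases not_and_or.mp hcond with hi | hj
      · simp [List.drop_eq_nil_of_le (not_lt.mp hi)]
      · simp [List.drop_eq_nil_of_le (not_lt.mp hj)]

-- ===== VERDICT (by name: the statement is the Claim_ definition above) =====
theorem is_correct_word_spec : Claim_equal_is_correct_word := by
  unfold Claim_equal_is_correct_word Spec_is_correct_word
  intro word1 word2 _
  simp only [is_correct_word, is_correct_word_alt]
  set w1 := PySem.Chars.lower word1.toList with hw1def
  set w2 := PySem.Chars.lower word2.toList with hw2def
  set s1 := PySem.List.sorted w1 (fun c => c) false with hs1def
  set s2 := PySem.List.sorted w2 (fun c => c) false with hs2def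
  have hfold : List.foldl pvRemove w2 w1 = w2.diff w1 := by
    rw [show pvRemove = List.erase from funext fun a => funext fun b => pvRemove_eq_erase a b]
    rw [List.diff_eq_foldl]
  have hp1 : s1.Pairwise (· ≤ ·) := by simpa using PySem.List.sorted_pairwise w1 (fun c => c)
  have hp2 : s2.Pairwise (· ≤ ·) := by simpa using PySem.List.sorted_pairwise w2 (fun c => c)
  have hm := pvMergeLoop_spec s1 s2 hp1 hp2 (s1.length + s2.length) 0 0 0 (by omega)
  simp only [List.drop_zero] at hm
  have hperm1 : s1.Perm w1 := PySem.List.sorted_perm w1 (fun c => c) false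
  have hperm2 : s2.Perm w2 := PySem.List.sorted_perm w2 (fun c => c) false
  have hdlen : (s2.diff s1).length = (w2.diff w1).length := by
    rw [List.Perm.diff_left s2 hperm1]
    exact (List.Perm.diff_right w1 hperm2).length_eq
  have hlen2 : s2.length = w2.length := hperm2.length_eq
  have hw2 : w2.length = word2.toList.length := by simp [hw2def, PySem.Chars.lower]
  rw [hfold]
  simp only [PySem.List.len_eq, PySem.Str.len_eq]
  split_ifs with h
  · symm; simp only [decide_eq_true_eq]; omega
  · symm; simp only [decide_eq_false_iff_not]; omega
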